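-- pv_equiv track=rewrite | github.com/DieFleitas/facultad | 2025/exactas/algo1/src/2mitad/ejercicios/7/ej1.py | pos_secuencia_ordenada_mas_larga
-- ===== SOURCE A (Python) =====
-- def pos_secuencia_ordenada_mas_larga(s: list[int]) -> int:
--     """
--     Pre: |s| > 0.
--     Post: devuelve i donde inicia la secuencia ordenada (no decreciente) mas larga.
--     Si empate, devuelve la primera.
--     """
--     n = len(s)
--     best_start = 0
--     best_len = 1
--     cur_start = 0
--     cur_len = 1
--     i = 1
--     while i < n:
--         if s[i - 1] <= s[i]:
--             cur_len += 1
--         else: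
--             # cerrar actual
--             if cur_len > best_len:
--                 best_len = cur_len
--                 best_start = cur_start
--             cur_start = i
--             cur_len = 1
--         i += 1
--     # comparar al final
--     if cur_len > best_len:
--         best_len = cur_len
--         best_start = cur_start
--     return best_start
-- ===== SOURCE B (Python) =====
-- def pos_secuencia_ordenada_mas_larga(s: list[int]) -> int:
--     n = len(s)
--     # pass 1: run boundaries (index i starts a new run iff s[i] < s[i-1])
--     bounds = [0] + [i for i in range(1, n) if s[i] < s[i - 1]] + [n]
--     # pass 2: max over consecutive boundary pairs; strict '>' keeps the earliest tie
--     best = (0, 0)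
--     for a, b in zip(bounds, bounds[1:]):
--         if b - a > best[1]:
--             best = (a, b - a)
--     return best[0]
-- ===== Notes on version B (the rewrite author's own statement) =====
-- stated objective: alternative
-- what changed: Replaces A's single stateful scan (four running variables, close-and-compare logic repeated at the end) by two separate passes: one scan collecting run boundaries into a list, then a max-scan over consecutive boundary pairs.
import Mathlib
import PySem

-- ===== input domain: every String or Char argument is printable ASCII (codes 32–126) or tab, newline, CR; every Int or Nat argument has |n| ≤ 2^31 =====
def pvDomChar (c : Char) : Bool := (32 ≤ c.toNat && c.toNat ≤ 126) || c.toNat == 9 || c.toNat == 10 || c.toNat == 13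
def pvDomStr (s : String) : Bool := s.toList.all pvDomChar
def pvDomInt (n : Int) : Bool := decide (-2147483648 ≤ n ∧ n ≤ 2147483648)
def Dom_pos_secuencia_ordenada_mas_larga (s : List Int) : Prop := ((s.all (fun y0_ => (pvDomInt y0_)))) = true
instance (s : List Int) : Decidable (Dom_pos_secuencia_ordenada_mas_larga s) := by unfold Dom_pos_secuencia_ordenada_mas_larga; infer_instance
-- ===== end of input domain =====

-- B restructures A's single stateful scan into two passes (a run-boundary list, then a max over consecutive pairs); same O(n) cost ("alternative").

-- ===== PORT A =====
-- One iteration of A's while-loop; state = (best_start, best_len, cur_start, cur_len).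
-- s.getD i 0 is exact here: every index the loop touches is in range (1 ≤ i < s.length).
def stepA (s : List Int) (st : Nat × Nat × Nat × Nat) (i : Nat) : Nat × Nat × Nat × Nat :=
  match st with
  | (bs, bl, cs, cl) =>
    if s.getD (i - 1) 0 ≤ s.getD i 0 then (bs, bl, cs, cl + 1)
    else if cl > bl then (cs, cl, i, 1) else (bs, bl, i, 1)

def pos_secuencia_ordenada_mas_larga (s : List Int) : Int :=
  let n := s.length
  match (List.range' 1 (n - 1)).foldl (stepA s) (0, 1, 0, 1) with
  | (bs, bl, cs, cl) => if cl > bl then (cs : Int) else (bs : Int)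

-- ===== PORT B =====
-- One step of B's second pass: fold the max-tracker over a consecutive boundary pair.
def stepB (best : Nat × Nat) (p : Nat × Nat) : Nat × Nat :=
  if p.2 - p.1 > best.2 then (p.1, p.2 - p.1) else best

def pos_secuencia_ordenada_mas_larga_alt (s : List Int) : Int :=
  let n := s.length
  -- pass 1: run boundaries (i starts a new run iff s[i] < s[i-1]); indices in range, getD exact
  let bounds := 0 :: ((List.range' 1 (n - 1)).filter (fun i => decide (s.getD i 0 < s.getD (i - 1) 0))) ++ [n]
  -- pass 2: zip(bounds, bounds[1:]) and track the max segment
  let best := (bounds.zip bounds.tail).foldl stepB (0, 0)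
  (best.1 : Int)

-- ===== PRECONDITION & SPEC =====
def Spec_pos_secuencia_ordenada_mas_larga (s : List Int) (out : Int) : Prop := out = pos_secuencia_ordenada_mas_larga_alt s
instance (s : List Int) (out : Int) : Decidable (Spec_pos_secuencia_ordenada_mas_larga s out) := by unfold Spec_pos_secuencia_ordenada_mas_larga; infer_instance

-- ===== CLAIM (what is proved, stated in full; the proofs are below) =====
def Claim_equal_pos_secuencia_ordenada_mas_larga : Prop := ∀ (s : List Int), Dom_pos_secuencia_ordenada_mas_larga s → Spec_pos_secuencia_ordenada_mas_larga s (pos_secuencia_ordenada_mas_larga s)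

-- ===== LEMMAS AND PROOFS =====

-- boundary list of the prefix scanned up to index m
def pvBnds (s : List Int) (m : Nat) : List Nat :=
  0 :: (List.range' 1 m).filter (fun i => decide (s.getD i 0 < s.getD (i - 1) 0))

theorem pvTailNil (s : List Int) (m : Nat) (h : (pvBnds s m).tail = []) : pvBnds s m = [0] := by
  simp [pvBnds] at h ⊢; exact h

theorem pvZipTailConcat (a j : Nat) (L : List Nat) :
    ((a :: L) ++ [j]).zip (((a :: L) ++ [j]).tail) =
      (a :: L).zip L ++ [((a :: L).getLastD 0, j)] := by
  induction L generalizing a with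
  | nil => simp
  | cons b L ih =>
      have h := ih b
      simp only [List.cons_append, List.tail_cons] at h ⊢
      simp [List.zip, List.zipWith] at h ⊢
      exact h

-- main invariant: A's state after scanning i = 1..m, in terms of B's boundary list of the prefix
theorem pvInv (s : List Int) (m : Nat) :
    ∀ bs bl cs cl, (List.range' 1 m).foldl (stepA s) (0, 1, 0, 1) = (bs, bl, cs, cl) →
      cs = (pvBnds s m).getLastD 0 ∧ cl + cs = m + 1 ∧
      (((pvBnds s m).tail = [] ∧ bs = 0 ∧ bl = 1) ∨
       ((pvBnds s m).tail ≠ [] ∧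
         ((pvBnds s m).zip (pvBnds s m).tail).foldl stepB (0, 0) = (bs, bl))) := by
  induction m with
  | zero =>
      intro bs bl cs cl h
      simp only [List.range'_zero, List.foldl_nil, Prod.mk.injEq] at h
      obtain ⟨h1, h2, h3, h4⟩ := h
      subst h1; subst h2; subst h3; subst h4
      simp [pvBnds]
  | succ m ih =>
      intro bs bl cs cl h
      rw [List.range'_1_concat, List.foldl_append] at h
      obtain ⟨bs0, bl0, cs0, cl0, h0⟩ :
          ∃ a b c d, (List.range' 1 m).foldl (stepA s) (0, 1, 0, 1) = (a, b, c, d) :=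
        ⟨_, _, _, _, rfl⟩
      obtain ⟨hcs, hcl, hbest⟩ := ih bs0 bl0 cs0 cl0 h0
      rw [h0] at h
      have hadd : 1 + m = m + 1 := Nat.add_comm 1 m
      simp only [List.foldl_cons, List.foldl_nil, stepA, hadd, Nat.add_sub_cancel] at h
      by_cases hle : s.getD m 0 ≤ s.getD (m + 1) 0
      · -- non-decreasing step: boundary list unchanged
        have hcond : (decide (s.getD (m + 1) 0 < s.getD (m + 1 - 1) 0)) = false := by
          simp only [Nat.add_sub_cancel, decide_eq_false_iff_not, not_lt]
          exact hle
        have hfil : pvBnds s (m + 1) = pvBnds s m := by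
          simp only [pvBnds, List.range'_1_concat, hadd, List.filter_append, List.filter_cons,
            List.filter_nil, hcond]
          simp
        rw [if_pos hle] at h
        simp only [Prod.mk.injEq] at h
        obtain ⟨e1, e2, e3, e4⟩ := h
        rw [hfil]
        refine ⟨by omega, by omega, ?_⟩
        rcases hbest with ⟨t1, t2, t3⟩ | ⟨t1, t2⟩
        · exact Or.inl ⟨t1, by omega, by omega⟩
        · exact Or.inr ⟨t1, by rw [t2]; exact Prod.ext (by omega) (by omega)⟩
      · -- boundary at m+1
        have hcond : (decide (s.getD (m + 1) 0 < s.getD (m + 1 - 1) 0)) = true := by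
          simp only [Nat.add_sub_cancel, decide_eq_true_eq]
          omega
        have hfil : pvBnds s (m + 1) = pvBnds s m ++ [m + 1] := by
          simp only [pvBnds, List.range'_1_concat, hadd, List.filter_append, List.filter_cons,
            List.filter_nil, hcond]
          simp
        rw [if_neg hle] at h
        have hz : ((pvBnds s (m + 1)).zip (pvBnds s (m + 1)).tail) =
            ((pvBnds s m).zip (pvBnds s m).tail) ++ [((pvBnds s m).getLastD 0, m + 1)] := by
          rw [hfil]
          have := pvZipTailConcat 0 (m + 1)
            ((List.range' 1 m).filter (fun i => decide (s.getD i 0 < s.getD (i - 1) 0)))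
          simpa [pvBnds] using this
        have hlast : (pvBnds s (m + 1)).getLastD 0 = m + 1 := by
          rw [hfil]; simp
        have htl : (pvBnds s (m + 1)).tail ≠ [] := by
          rw [hfil]; simp [pvBnds]
        by_cases hgt : cl0 > bl0
        · rw [if_pos hgt] at h
          simp only [Prod.mk.injEq] at h
          obtain ⟨e1, e2, e3, e4⟩ := h
          refine ⟨by rw [hlast, ← e3], by omega, Or.inr ⟨htl, ?_⟩⟩
          rw [hz, List.foldl_append]
          rcases hbest with ⟨t1, t2, t3⟩ | ⟨t1, t2⟩
          · have hF : pvBnds s m = [0] := pvTailNil s m t1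
            have hcs00 : cs0 = 0 := by rw [hcs, hF]; rfl
            have hzf : ((pvBnds s m).zip (pvBnds s m).tail).foldl stepB (0, 0) = (0, 0) := by
              rw [hF]; rfl
            have hld : (pvBnds s m).getLastD 0 = 0 := by rw [hF]; rfl
            rw [hzf, hld]
            simp only [List.foldl_cons, List.foldl_nil, stepB]
            rw [if_pos (by omega)]
            have hbs : bs = 0 := by omega
            have hbl : bl = m + 1 := by omega
            rw [hbs, hbl]
            simp
          · rw [t2]
            simp only [List.foldl_cons, List.foldl_nil, stepB, ← hcs]
            have hs : m + 1 - cs0 = cl0 := by omega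
            rw [hs, if_pos (by simpa using hgt), ← e1, ← e2]
        · rw [if_neg hgt] at h
          simp only [Prod.mk.injEq] at h
          obtain ⟨e1, e2, e3, e4⟩ := h
          refine ⟨by rw [hlast, ← e3], by omega, Or.inr ⟨htl, ?_⟩⟩
          rw [hz, List.foldl_append]
          rcases hbest with ⟨t1, t2, t3⟩ | ⟨t1, t2⟩
          · -- no boundary yet and cl0 ≤ bl0 = 1: forces m = 0, cl0 = 1
            have hF : pvBnds s m = [0] := pvTailNil s m t1
            have hcs00 : cs0 = 0 := by rw [hcs, hF]; rfl
            have hzf : ((pvBnds s m).zip (pvBnds s m).tail).foldl stepB (0, 0) = (0, 0) := by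
              rw [hF]; rfl
            have hld : (pvBnds s m).getLastD 0 = 0 := by rw [hF]; rfl
            rw [hzf, hld]
            simp only [List.foldl_cons, List.foldl_nil, stepB]
            rw [if_pos (by omega)]
            have hbs : bs = 0 := by omega
            have hbl : bl = m + 1 := by omega
            rw [hbs, hbl]
            simp
          · rw [t2]
            simp only [List.foldl_cons, List.foldl_nil, stepB, ← hcs]
            have hs : m + 1 - cs0 = cl0 := by omega
            rw [hs, if_neg (by simpa using hgt), ← e1, ← e2]

-- ===== VERDICT (by name: the statement is the Claim_ definition above) =====
theorem pos_secuencia_ordenada_mas_larga_spec : Claim_equal_pos_secuencia_ordenada_mas_larga := by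
  intro s _
  unfold Spec_pos_secuencia_ordenada_mas_larga
  simp only [pos_secuencia_ordenada_mas_larga, pos_secuencia_ordenada_mas_larga_alt]
  obtain ⟨bs, bl, cs, cl, h0⟩ :
      ∃ a b c d, (List.range' 1 (s.length - 1)).foldl (stepA s) (0, 1, 0, 1) = (a, b, c, d) :=
    ⟨_, _, _, _, rfl⟩
  obtain ⟨hcs, hcl, hbest⟩ := pvInv s (s.length - 1) bs bl cs cl h0
  rw [h0]
  have hz : ((0 :: ((List.range' 1 (s.length - 1)).filter
        (fun i => decide (s.getD i 0 < s.getD (i - 1) 0))) ++ [s.length]).zip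
      ((0 :: ((List.range' 1 (s.length - 1)).filter
        (fun i => decide (s.getD i 0 < s.getD (i - 1) 0))) ++ [s.length]).tail)) =
      ((pvBnds s (s.length - 1)).zip (pvBnds s (s.length - 1)).tail) ++
        [((pvBnds s (s.length - 1)).getLastD 0, s.length)] := by
    have := pvZipTailConcat 0 s.length
      ((List.range' 1 (s.length - 1)).filter (fun i => decide (s.getD i 0 < s.getD (i - 1) 0)))
    simpa [pvBnds] using this
  rw [hz, List.foldl_append]
  rcases hbest with ⟨t1, t2, t3⟩ | ⟨t1, t2⟩
  · -- no interior boundary: single run, both return 0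
    have hF : pvBnds s (s.length - 1) = [0] := pvTailNil s (s.length - 1) t1
    have hcs0 : cs = 0 := by rw [hcs, hF]; rfl
    have hzf : ((pvBnds s (s.length - 1)).zip (pvBnds s (s.length - 1)).tail).foldl
        stepB (0, 0) = (0, 0) := by rw [hF]; rfl
    have hld : (pvBnds s (s.length - 1)).getLastD 0 = 0 := by rw [hF]; rfl
    rw [hzf, hld]
    simp only [List.foldl_cons, List.foldl_nil, stepB]
    rw [hcs0, t2]
    split <;> split <;> simp
  · -- at least one closed run: A's (bs,bl) is exactly B's running best
    rw [t2, ← hcs]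
    simp only [List.foldl_cons, List.foldl_nil, stepB]
    have hn1 : cl + cs = s.length := by
      have hpos : 1 ≤ s.length := by
        by_contra hc
        have h00 : s.length = 0 := by omega
        rw [h00] at t1
        simp [pvBnds] at t1
      omega
    have hs : s.length - cs = cl := by omega
    rw [hs]
    by_cases hgt : cl > bl
    · rw [if_pos (by simpa using hgt), if_pos hgt]
    · rw [if_neg (by simpa using hgt), if_neg hgt]
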